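-- pv_equiv track=rewrite | github.com/jonathanhassin/DNA | DNA_ERROR_CORRECTION_ENCODING.py | to_base_4RLL
-- ===== SOURCE A (Python) =====
-- def to_base_4RLL(n):  ####################33need to add back original
--     if n == 0:
--         return "4444"
--     base_4 = []
--     while n > 0:
--         base_4.append(str(n % 4))
--         n //= 4
--     for i in range(len(base_4)):
--         if base_4[i]=='0':
--             base_4[i]='4'
--     for i in range(4-len(base_4)):
--         base_4+='4'
--     return ''.join(reversed(base_4))
-- ===== SOURCE B (Python) =====
-- def to_base_4RLL(n):
--     def conv(m):
--         if m <= 0: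
--             return ''
--         d = m % 4
--         return conv(m // 4) + ('4' if d == 0 else str(d))
--     return conv(n).rjust(4, '4')
-- ===== Notes on version B (the rewrite author's own statement) =====
-- stated objective: simpler
-- what changed: Replaces the LSB-first list build plus separate 0-to-4 fixup pass, padding loop and reversal with a single most-significant-first recursion that maps 0 to '4' as it goes, followed by str.rjust for the padding.
import Mathlib
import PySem

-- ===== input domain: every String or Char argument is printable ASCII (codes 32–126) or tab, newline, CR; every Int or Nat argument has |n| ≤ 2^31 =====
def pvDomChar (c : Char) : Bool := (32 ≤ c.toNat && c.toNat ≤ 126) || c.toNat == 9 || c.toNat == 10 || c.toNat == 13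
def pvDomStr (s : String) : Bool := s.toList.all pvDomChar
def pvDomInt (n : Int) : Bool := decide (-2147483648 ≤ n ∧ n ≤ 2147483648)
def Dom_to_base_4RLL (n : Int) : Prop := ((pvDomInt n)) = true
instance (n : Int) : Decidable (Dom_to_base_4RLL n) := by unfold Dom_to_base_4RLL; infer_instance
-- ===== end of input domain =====

-- B replaces A's LSB-first digit list + separate 0→'4' fixup + padding loop + reversal by one
-- most-significant-first recursion that remaps as it goes, then rjust-pads; objective: simpler.

-- ===== PORT A =====
-- port of str(d) for 0 ≤ d < 4 (exact on that range: a single digit character)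
def digitChar4 (d : Int) : Char :=
  if d == 0 then '0' else if d == 1 then '1' else if d == 2 then '2' else '3'

-- the while loop: collects str(n % 4) LSB-first (as chars), n //= 4
def aLoop (n : Int) : List Char :=
  if _h : 0 < n then
    digitChar4 (PySem.Int.mod n 4) :: aLoop (PySem.Int.floordiv n 4)
  else []
termination_by n.toNat
decreasing_by
  rw [PySem.Int.floordiv_eq_ediv_of_pos (by norm_num : (0:Int) < 4)]
  omega

def to_base_4RLL (n : Int) : String :=
  if n == 0 then "4444"
  else
    let base4 := aLoop n
    let base4 := base4.map (fun c => if c == '0' then '4' else c)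
    let base4 := base4 ++ List.replicate (4 - base4.length) '4'
    String.ofList base4.reverse

-- ===== PORT B =====
-- conv(m): '' for m ≤ 0, else conv(m // 4) + ('4' if m % 4 == 0 else str(m % 4))
def convB (m : Int) : List Char :=
  if _h : 0 < m then
    convB (PySem.Int.floordiv m 4) ++
      [if PySem.Int.mod m 4 == 0 then '4' else digitChar4 (PySem.Int.mod m 4)]
  else []
termination_by m.toNat
decreasing_by
  rw [PySem.Int.floordiv_eq_ediv_of_pos (by norm_num : (0:Int) < 4)]
  omega

def to_base_4RLL_alt (n : Int) : String :=
  let s := convB n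
  -- str.rjust(4, '4'): left-pad with '4' up to length 4 (exact port of rjust)
  String.ofList (List.replicate (4 - s.length) '4' ++ s)

-- ===== PRECONDITION & SPEC =====
def Spec_to_base_4RLL (n : Int) (out : String) : Prop := out = to_base_4RLL_alt n
instance (n : Int) (out : String) : Decidable (Spec_to_base_4RLL n out) := by unfold Spec_to_base_4RLL; infer_instance

-- ===== CLAIM (what is proved, stated in full; the proofs are below) =====
def Claim_equal_to_base_4RLL : Prop := ∀ (n : Int), Dom_to_base_4RLL n → Spec_to_base_4RLL n (to_base_4RLL n)

-- ===== LEMMAS AND PROOFS =====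

theorem fix_digitChar4 (m : Int) (h0 : 0 ≤ m) (h4 : m < 4) :
    (if digitChar4 m == '0' then '4' else digitChar4 m)
      = (if m == 0 then '4' else digitChar4 m) := by
  interval_cases m <;> decide

-- B's MSB-first recursion produces exactly A's fixed-up digit list, reversed
theorem convB_eq (n : Int) :
    convB n = ((aLoop n).map (fun c => if c == '0' then '4' else c)).reverse := by
  by_cases h : 0 < n
  · rw [convB, aLoop]
    simp only [h, dite_true, List.map_cons, List.reverse_cons]
    rw [convB_eq (PySem.Int.floordiv n 4)]
    rw [fix_digitChar4 _ (PySem.Int.mod_nonneg n (by norm_num)) (PySem.Int.mod_lt n (by norm_num))]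
  · rw [convB, aLoop]
    simp [h]
termination_by n.toNat
decreasing_by
  rw [PySem.Int.floordiv_eq_ediv_of_pos (by norm_num : (0:Int) < 4)]
  omega

-- ===== VERDICT (by name: the statement is the Claim_ definition above) =====
theorem to_base_4RLL_spec : Claim_equal_to_base_4RLL := by
  intro n _
  unfold Spec_to_base_4RLL to_base_4RLL to_base_4RLL_alt
  by_cases h0 : n = 0
  · subst h0
    rw [show convB 0 = [] from by rw [convB]; simp]
    decide
  · simp only [h0, if_false]
    rw [convB_eq n]
    simp [List.reverse_append, List.reverse_replicate]
    exact fun h => absurd h h0
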